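-- pv_equiv track=rewrite | github.com/NikolaSL00/SoftUni | Programming Advanced Python/5. Functions Advanced/Lecture/06. Expressions.py | expressions
-- ===== SOURCE A (Python) =====
-- def expressions(numbers, current_result, expression=""):
--     if not numbers:
--         return [(expression, current_result)]
--     result_plus = expressions(
--         numbers[1:],
--         current_result + numbers[0],
--         f"{expression}+{numbers[0]}")
--     result_minus = expressions(
--         numbers[1:],
--         current_result - numbers[0],
--         f"{expression}-{numbers[0]}")
--     return result_minus + result_plus
-- ===== SOURCE B (Python) =====
-- def expressions(numbers, current_result, expression=""):
--     # Iterative breadth-first frontier expansion instead of recursion: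
--     # expand every partial expression by '-num' then '+num' for each number.
--     states = [(expression, current_result)]
--     for num in numbers:
--         nxt = []
--         for expr, total in states:
--             nxt.append((expr + f"-{num}", total - num))
--             nxt.append((expr + f"+{num}", total + num))
--         states = nxt
--     return states
-- ===== Notes on version B (the rewrite author's own statement) =====
-- stated objective: alternative
-- what changed: Replaces the depth-first recursion (minus branch before plus, concatenating sublists) with an iterative loop over the numbers that expands a flat frontier list of partial (expression, total) states, appending the '-' and '+' extensions of each state in order.
import Mathlib
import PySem

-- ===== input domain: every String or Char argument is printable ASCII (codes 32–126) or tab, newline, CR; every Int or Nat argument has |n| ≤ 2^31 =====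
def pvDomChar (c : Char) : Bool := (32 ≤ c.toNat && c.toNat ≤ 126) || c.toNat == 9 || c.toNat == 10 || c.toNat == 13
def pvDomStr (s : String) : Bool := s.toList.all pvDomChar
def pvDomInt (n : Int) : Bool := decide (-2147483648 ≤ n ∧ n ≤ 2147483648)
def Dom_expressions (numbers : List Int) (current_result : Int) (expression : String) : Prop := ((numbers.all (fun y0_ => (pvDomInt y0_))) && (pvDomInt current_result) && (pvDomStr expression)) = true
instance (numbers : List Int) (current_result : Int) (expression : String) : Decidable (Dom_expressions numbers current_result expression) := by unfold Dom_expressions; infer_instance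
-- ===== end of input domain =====

-- B replaces A's depth-first recursion with an iterative loop that expands a flat
-- frontier of partial (expression, total) states ('-' then '+' per number): an
-- alternative decomposition of the same enumeration, same cost.

-- ===== PORT A =====
def expressions (numbers : List Int) (current_result : Int) (expression : String) : List (String × Int) :=
  match numbers with
  | [] => [(expression, current_result)]
  | n :: rest =>
    let result_plus := expressions rest (current_result + n) (expression ++ "+" ++ PySem.Int.toStr n)
    let result_minus := expressions rest (current_result - n) (expression ++ "-" ++ PySem.Int.toStr n)
    result_minus ++ result_plus

-- ===== PORT B =====
def pvStep (states : List (String × Int)) (num : Int) : List (String × Int) :=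
  states.flatMap (fun st =>
    [(st.1 ++ "-" ++ PySem.Int.toStr num, st.2 - num),
     (st.1 ++ "+" ++ PySem.Int.toStr num, st.2 + num)])

def expressions_alt (numbers : List Int) (current_result : Int) (expression : String) : List (String × Int) :=
  numbers.foldl pvStep [(expression, current_result)]

-- ===== PRECONDITION & SPEC =====
def Spec_expressions (numbers : List Int) (current_result : Int) (expression : String) (out : List (String × Int)) : Prop := out = expressions_alt numbers current_result expression
instance (numbers : List Int) (current_result : Int) (expression : String) (out : List (String × Int)) : Decidable (Spec_expressions numbers current_result expression out) := by unfold Spec_expressions; infer_instance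

-- ===== CLAIM (what is proved, stated in full; the proofs are below) =====
def Claim_equal_expressions : Prop := ∀ (numbers : List Int) (current_result : Int) (expression : String), Dom_expressions numbers current_result expression → Spec_expressions numbers current_result expression (expressions numbers current_result expression)

-- ===== LEMMAS AND PROOFS =====

theorem pvStep_append (s t : List (String × Int)) (n : Int) :
    pvStep (s ++ t) n = pvStep s n ++ pvStep t n := by
  simp [pvStep]

theorem foldl_pvStep_append (ns : List Int) (s t : List (String × Int)) :
    ns.foldl pvStep (s ++ t) = ns.foldl pvStep s ++ ns.foldl pvStep t := by
  induction ns generalizing s t with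
  | nil => simp
  | cons n rest ih => simp [List.foldl, pvStep_append, ih]

theorem expressions_eq_alt (numbers : List Int) (cr : Int) (e : String) :
    expressions numbers cr e = expressions_alt numbers cr e := by
  induction numbers generalizing cr e with
  | nil => simp [expressions, expressions_alt]
  | cons n rest ih =>
    simp only [expressions, ih, expressions_alt, List.foldl]
    rw [← foldl_pvStep_append]
    simp [pvStep]

-- ===== VERDICT (by name: the statement is the Claim_ definition above) =====
theorem expressions_spec : Claim_equal_expressions := by
  intro numbers cr e _
  unfold Spec_expressions
  exact expressions_eq_alt numbers cr e
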